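-- pv_equiv track=rewrite | github.com/the-sarge/agentchattr | app.py | _auto_cast
-- ===== SOURCE A (Python) =====
-- def _auto_cast(roles: list[str], online_agents: list[str], started_by: str) -> dict:
--     """Auto-assign roles to available agents. Returns empty dict if not enough agents."""
--     cast = {}
--     available = list(online_agents)
--
--     for role in roles:
--         if not available:
--             # Reuse agents if we run out (one agent, multiple roles)
--             available = list(online_agents)
--         if not available:
--             return {}
--         agent = available.pop(0)
--         cast[role] = agent
--
--     return cast
-- ===== SOURCE B (Python) =====
-- def _auto_cast(roles: list[str], online_agents: list[str], started_by: str) -> dict: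
--     """Auto-assign roles to available agents. Returns empty dict if not enough agents."""
--     if not online_agents:
--         return {}
--     n = len(online_agents)
--     return {role: online_agents[i % n] for i, role in enumerate(roles)}
-- ===== Notes on version B (the rewrite author's own statement) =====
-- stated objective: simpler
-- what changed: Replaced the mutable available pool with pop(0) and refill-when-empty by a single dict comprehension indexing online_agents[i % n]; each pop(0) shift disappears.
import Mathlib
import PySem

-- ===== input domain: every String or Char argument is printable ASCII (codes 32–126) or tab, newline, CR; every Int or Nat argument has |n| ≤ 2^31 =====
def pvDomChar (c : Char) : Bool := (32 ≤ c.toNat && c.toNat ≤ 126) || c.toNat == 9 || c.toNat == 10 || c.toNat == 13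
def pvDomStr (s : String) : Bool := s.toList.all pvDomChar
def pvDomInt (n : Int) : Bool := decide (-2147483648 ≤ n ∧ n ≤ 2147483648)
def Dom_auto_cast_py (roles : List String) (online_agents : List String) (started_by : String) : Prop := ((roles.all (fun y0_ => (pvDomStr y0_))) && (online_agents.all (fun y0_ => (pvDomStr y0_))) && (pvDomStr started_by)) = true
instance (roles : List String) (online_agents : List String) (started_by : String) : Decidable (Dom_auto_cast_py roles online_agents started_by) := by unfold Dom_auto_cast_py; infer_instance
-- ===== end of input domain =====

-- B replaces A's mutable pop(0)/refill pool with a dict comprehension using i % n index arithmetic (objective: simpler).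
-- ===== PORT A =====
-- the for-loop of _auto_cast: state = (remaining roles, available pool, cast dict)
def autoCastLoopA (online_agents : List String) : List String → List String → PySem.Dict String String → PySem.Dict String String
  | [], _, cast => cast
  | role :: rest, available, cast =>
    let available := if available.isEmpty then online_agents else available  -- refill when empty
    match available with
    | [] => PySem.Dict.empty                                                 -- 'return {}'
    | agent :: tl => autoCastLoopA online_agents rest tl (cast.insert role agent)  -- agent = available.pop(0)

def auto_cast_py (roles : List String) (online_agents : List String) (_started_by : String) : List (String × String) :=
  (autoCastLoopA online_agents roles online_agents PySem.Dict.empty).items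

-- ===== PORT B =====
def auto_cast_py_alt (roles : List String) (online_agents : List String) (_started_by : String) : List (String × String) :=
  if online_agents.isEmpty then [] else
  let n : Int := online_agents.length
  -- {role: online_agents[i % n] for i, role in enumerate(roles)}; the index i % n is always in range (n > 0)
  ((PySem.List.enumerate roles).foldl
      (fun d p => d.insert p.2 ((PySem.List.pyGet? online_agents (PySem.Int.mod p.1 n)).getD ""))
      PySem.Dict.empty).items

-- ===== PRECONDITION & SPEC =====
def Spec_auto_cast_py (roles : List String) (online_agents : List String) (started_by : String) (out : List (String × String)) : Prop := out = auto_cast_py_alt roles online_agents started_by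
instance (roles : List String) (online_agents : List String) (started_by : String) (out : List (String × String)) : Decidable (Spec_auto_cast_py roles online_agents started_by out) := by unfold Spec_auto_cast_py; infer_instance

-- ===== CLAIM (what is proved, stated in full; the proofs are below) =====
def Claim_equal_auto_cast_py : Prop := ∀ (roles : List String) (online_agents : List String) (started_by : String), Dom_auto_cast_py roles online_agents started_by → Spec_auto_cast_py roles online_agents started_by (auto_cast_py roles online_agents started_by)

-- ===== LEMMAS AND PROOFS =====

-- ===== VERDICT (by name: the statement is the Claim_ definition above) =====
-- A's loop with an empty pool first refills it, so it behaves as if the pool were the full list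
theorem autoCastLoopA_nil_refill (online : List String) (h : online ≠ []) (roles : List String)
    (cast : PySem.Dict String String) :
    autoCastLoopA online roles [] cast = autoCastLoopA online roles online cast := by
  cases roles with
  | nil => rfl
  | cons r rest =>
    obtain ⟨a, tl, rfl⟩ := List.exists_cons_of_ne_nil h
    simp [autoCastLoopA]

-- main invariant: when processing role index i, A's pool is online.drop (i % n),
-- and the rest of the loop equals B's fold over 'enumerate roles i'
theorem autoCastLoopA_eq_fold (online : List String) (h : online ≠ []) :
    ∀ (roles : List String) (i : Nat) (cast : PySem.Dict String String),
      autoCastLoopA online roles (online.drop (i % online.length)) cast =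
      (PySem.List.enumerate roles (i : Int)).foldl
        (fun d p => d.insert p.2 ((PySem.List.pyGet? online (PySem.Int.mod p.1 (online.length : Int))).getD ""))
        cast := by
  intro roles
  induction roles with
  | nil => intro i cast; simp [autoCastLoopA, PySem.List.enumerate_nil]
  | cons r rest ih =>
    intro i cast
    have hn : 0 < online.length := List.length_pos_of_ne_nil h
    have hk : i % online.length < online.length := Nat.mod_lt _ hn
    have hdrop : online.drop (i % online.length) =
        online[i % online.length] :: online.drop (i % online.length + 1) := by
      rw [List.drop_eq_getElem_cons hk]
    have hmod : PySem.Int.mod (i : Int) (online.length : Int) = ((i % online.length : Nat) : Int) := by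
      rw [PySem.Int.mod_eq_emod_of_pos (by exact_mod_cast hn)]
      exact (Int.natCast_mod i online.length).symm
    have hget : (PySem.List.pyGet? online (PySem.Int.mod (i : Int) (online.length : Int))).getD "" =
        online[i % online.length] := by
      rw [hmod, PySem.List.pyGet?_natCast, List.getElem?_eq_getElem hk]
      rfl
    rw [PySem.List.enumerate_cons, List.foldl_cons, hdrop]
    simp only [autoCastLoopA, List.isEmpty_cons, Bool.false_eq_true, if_false, hget]
    -- relate the new pool to drop ((i+1) % n)
    by_cases hlt : i % online.length + 1 < online.length
    · have hn1 : 1 % online.length = 1 := Nat.mod_eq_of_lt (by omega)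
      have hmod2 : (i + 1) % online.length = i % online.length + 1 :=
        calc (i + 1) % online.length = (i % online.length + 1 % online.length) % online.length :=
              Nat.add_mod i 1 online.length
          _ = (i % online.length + 1) % online.length := by rw [hn1]
          _ = i % online.length + 1 := Nat.mod_eq_of_lt hlt
      have hrec := ih (i + 1) (cast.insert r online[i % online.length])
      rw [hmod2] at hrec
      rw [hrec]; norm_cast
    · have heq : i % online.length + 1 = online.length := by omega
      have h1 : online.drop (i % online.length + 1) = [] := by
        rw [heq]; simp
      have h2 : (i + 1) % online.length = 0 := by
        rcases Nat.lt_or_ge 1 online.length with hgt | hle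
        · have hn1 : 1 % online.length = 1 := Nat.mod_eq_of_lt hgt
          calc (i + 1) % online.length
              = (i % online.length + 1 % online.length) % online.length := Nat.add_mod i 1 online.length
            _ = online.length % online.length := by rw [hn1, heq]
            _ = 0 := Nat.mod_self online.length
        · have h1' : online.length = 1 := by omega
          rw [h1']; exact Nat.mod_one _
      rw [h1, autoCastLoopA_nil_refill online h]
      have hrec := ih (i + 1) (cast.insert r online[i % online.length])
      rw [h2] at hrec
      simp only [List.drop_zero] at hrec
      rw [hrec]; norm_cast

theorem auto_cast_py_spec : Claim_equal_auto_cast_py := by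
  intro roles online started_by _
  unfold Spec_auto_cast_py auto_cast_py auto_cast_py_alt
  by_cases h : online.isEmpty
  · have hnil : online = [] := List.isEmpty_iff.mp h
    subst hnil
    cases roles with
    | nil => simp [autoCastLoopA, PySem.Dict.empty]
    | cons r rest => simp [autoCastLoopA, PySem.Dict.empty]
  · have hne : online ≠ [] := fun hh => h (by simp [hh])
    simp only [h, if_false, Bool.false_eq_true]
    have := autoCastLoopA_eq_fold online hne roles 0 PySem.Dict.empty
    rw [Nat.zero_mod, List.drop_zero] at this
    rw [this]
    norm_cast
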